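-- pv_equiv track=rewrite | github.com/imaldon4/wgu-ds1 | python/nfactorial.py | print_factorial
-- ===== SOURCE A (Python) =====
-- def print_factorial(fact_counter, fact_value):
--     output_string = ''          # initialize string
--
--     if fact_counter == 0:      # Base case: 0! = 1
--         output_string += '1'
--     elif fact_counter == 1:    # Base case: print 1 and result
--         output_string += str(fact_counter) +  ' = ' + str(fact_value)
--     else:                       # Recursive case
--         output_string += str(fact_counter) + ' * '
--         next_counter = fact_counter - 1
--         next_value = next_counter * fact_value
--         output_string += print_factorial(next_counter, next_value)
--
--     return output_string
-- ===== SOURCE B (Python) =====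
-- def print_factorial(fact_counter, fact_value):
--     # Iterative version: accumulate the product terms in a loop instead of recursing.
--     if fact_counter == 0:
--         return '1'
--     counter, value = fact_counter, fact_value
--     output_string = ''
--     while counter > 1:
--         output_string += str(counter) + ' * '
--         value = (counter - 1) * value
--         counter -= 1
--     return output_string + str(1) + ' = ' + str(value)
-- ===== Notes on version B (the rewrite author's own statement) =====
-- stated objective: alternative
-- what changed: Replaces the recursive descent with an iterative while-loop that accumulates the term string and threads the running value, with an early return for 0.
import Mathlib
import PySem

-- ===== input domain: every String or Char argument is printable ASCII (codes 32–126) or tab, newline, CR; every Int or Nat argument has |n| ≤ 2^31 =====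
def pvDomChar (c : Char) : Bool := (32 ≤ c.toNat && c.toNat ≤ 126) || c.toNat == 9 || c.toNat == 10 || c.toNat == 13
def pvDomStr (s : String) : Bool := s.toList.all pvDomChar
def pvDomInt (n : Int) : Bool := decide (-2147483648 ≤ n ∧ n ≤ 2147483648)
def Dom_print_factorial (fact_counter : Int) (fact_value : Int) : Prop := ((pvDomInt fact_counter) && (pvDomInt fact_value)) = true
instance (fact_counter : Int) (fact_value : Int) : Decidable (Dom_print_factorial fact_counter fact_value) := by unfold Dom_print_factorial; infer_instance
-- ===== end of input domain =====

-- B replaces A's recursive descent by an iterative accumulation loop (return-value equivalence on Pre_).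

-- ===== PORT A =====
-- A recurses on fact_counter - 1; the Nat fuel (= fact_counter.toNat under Pre_) only
-- bounds the recursion depth — inside Pre_ it never runs out.
def pfA (fuel : Nat) (fact_counter : Int) (fact_value : Int) : String :=
  if fact_counter == 0 then "1"
  else if fact_counter == 1 then
    PySem.Int.toStr fact_counter ++ " = " ++ PySem.Int.toStr fact_value
  else
    PySem.Int.toStr fact_counter ++ " * " ++
      (match fuel with
       | 0 => ""  -- unreachable inside Pre_
       | f + 1 => pfA f (fact_counter - 1) ((fact_counter - 1) * fact_value))

def print_factorial (fact_counter : Int) (fact_value : Int) : String :=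
  pfA fact_counter.toNat fact_counter fact_value

-- ===== PORT B =====
-- B's while-loop: while counter > 1, append 'counter * ', value := (counter-1)*value, counter -= 1;
-- then append '1 = value'. Fuel = fact_counter.toNat bounds the iterations (enough inside Pre_).
def pfLoop (fuel : Nat) (counter : Int) (value : Int) (acc : String) : String :=
  match fuel with
  | 0 => acc ++ PySem.Int.toStr 1 ++ " = " ++ PySem.Int.toStr value
  | f + 1 =>
    if counter > 1 then
      pfLoop f (counter - 1) ((counter - 1) * value) (acc ++ PySem.Int.toStr counter ++ " * ")
    else
      acc ++ PySem.Int.toStr 1 ++ " = " ++ PySem.Int.toStr value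

def print_factorial_alt (fact_counter : Int) (fact_value : Int) : String :=
  if fact_counter == 0 then "1"
  else pfLoop fact_counter.toNat fact_counter fact_value ""

-- ===== PRECONDITION & SPEC =====
-- Pre_ excludes negative counters, on which A has no base case and recurses until it raises
-- RecursionError (returns no value).
def Pre_print_factorial (fact_counter : Int) (fact_value : Int) : Prop :=
  0 ≤ fact_counter
instance (fact_counter : Int) (fact_value : Int) : Decidable (Pre_print_factorial fact_counter fact_value) := by unfold Pre_print_factorial; infer_instance

def pvWitness_print_factorial : Int × Int := (5, 1)

def Spec_print_factorial (fact_counter : Int) (fact_value : Int) (out : String) : Prop := out = print_factorial_alt fact_counter fact_value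
instance (fact_counter : Int) (fact_value : Int) (out : String) : Decidable (Spec_print_factorial fact_counter fact_value out) := by unfold Spec_print_factorial; infer_instance

-- ===== CLAIM (what is proved, stated in full; the proofs are below) =====
def Claim_equal_print_factorial : Prop := ∀ (fact_counter : Int) (fact_value : Int), Dom_print_factorial fact_counter fact_value → Pre_print_factorial fact_counter fact_value → Spec_print_factorial fact_counter fact_value (print_factorial fact_counter fact_value)

-- ===== LEMMAS AND PROOFS =====

-- The loop with accumulator acc produces acc ++ (what A's recursion produces), provided the
-- counter is ≥ 1 and the fuel is sufficient.
lemma pfLoop_eq_pfA (f : Nat) (c v : Int) (acc : String)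
    (h1 : 1 ≤ c) (h2 : c ≤ (f : Int) + 1) :
    pfLoop f c v acc = acc ++ pfA f c v := by
  induction f generalizing c v acc with
  | zero =>
    have hc : c = 1 := by omega
    subst hc
    simp [pfLoop, pfA, String.append_assoc]
  | succ f ih =>
    by_cases hc : c = 1
    · subst hc
      simp [pfLoop, pfA, String.append_assoc]
    · have hgt : c > 1 := by omega
      have hne0 : ¬ (c == 0) := by simp; omega
      have hne1 : ¬ (c == 1) := by simp; omega
      rw [pfLoop, pfA]
      simp only [hne0, hne1, Bool.false_eq_true, if_pos hgt]
      rw [ih (c - 1) ((c - 1) * v) _ (by omega) (by omega)]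
      simp [String.append_assoc]

-- ===== VERDICT (by name: the statement is the Claim_ definition above) =====
theorem print_factorial_spec : Claim_equal_print_factorial := by
  intro c v _ hpre
  have h0 : 0 ≤ c := hpre
  unfold Spec_print_factorial print_factorial print_factorial_alt
  by_cases hc : c = 0
  · subst hc; simp [pfA]
  · have hc1 : 1 ≤ c := by omega
    have hne0 : (c == 0) = false := by simp; omega
    rw [if_neg (by simp [hne0])]
    rw [pfLoop_eq_pfA c.toNat c v "" hc1 (by omega)]
    simp
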